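-- pv_equiv track=rewrite | github.com/vono-hvore/code-assistant-agent | core/codebase_scanner.py | prettier
-- ===== SOURCE A (Python) =====
-- from collections import defaultdict
--
-- def prettier(paths: list[str]) -> str:
--     tree = lambda: defaultdict(tree)
--     file_tree = tree()
--     pretty_str = ""
--
--     for path in paths:
--         parts = path.lstrip("./").split("/")
--         current = file_tree
--         for part in parts:
--             current = current[part]
--
--     def make_tree(node, prefix="") -> str:
--         pretty_str = ""
--         items = sorted(node.items())
--         for i, (name, child) in enumerate(items):
--             is_last = i == len(items) - 1
--             connector = "└── " if is_last else "├── "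
--             pretty_str += prefix + connector + name + "\n"
--             extension = "    " if is_last else "│   "
--             pretty_str += make_tree(child, prefix + extension)
--         return pretty_str
--
--     pretty_str += make_tree(file_tree)
--     return pretty_str
-- ===== SOURCE B (Python) =====
-- def prettier(paths: list[str]) -> str:
--     root = {}
--     for path in paths:
--         node = root
--         for part in path.lstrip("./").split("/"):
--             node = node.setdefault(part, {})
--     pieces = []
--     stack = []
--
--     def push(node, prefix):
--         items = sorted(node.items())
--         n = len(items)
--         for i in range(n - 1, -1, -1):
--             name, child = items[i]
--             last = i == n - 1
--             stack.append((prefix + ("└── " if last else "├── ") + name + "\n",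
--                           prefix + ("    " if last else "│   "),
--                           child))
--
--     push(root, "")
--     while stack:
--         line, child_prefix, child = stack.pop()
--         pieces.append(line)
--         push(child, child_prefix)
--     return "".join(pieces)
-- ===== Notes on version B (the rewrite author's own statement) =====
-- stated objective: alternative
-- what changed: The recursive make_tree is replaced by an iterative pre-order DFS over an explicit stack (children pushed in reverse sorted order, one frame per emitted line) with the lines collected in a list and joined once at the end.
import Mathlib
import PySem

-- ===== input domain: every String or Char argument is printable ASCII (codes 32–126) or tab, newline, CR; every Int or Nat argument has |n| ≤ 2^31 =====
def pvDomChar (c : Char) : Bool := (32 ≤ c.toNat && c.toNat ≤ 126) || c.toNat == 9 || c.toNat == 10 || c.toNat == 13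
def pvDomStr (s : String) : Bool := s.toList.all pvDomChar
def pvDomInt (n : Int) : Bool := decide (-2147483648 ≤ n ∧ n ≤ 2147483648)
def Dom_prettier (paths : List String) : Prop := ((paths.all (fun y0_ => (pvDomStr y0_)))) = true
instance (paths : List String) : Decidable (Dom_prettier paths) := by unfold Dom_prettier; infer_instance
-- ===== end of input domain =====

-- B changes only the rendering: an iterative DFS with an explicit stack (children pushed in
-- reverse sorted order, lines collected and joined) instead of A's recursive make_tree;
-- objective: alternative decomposition, same output and similar cost.

-- Shared tree-building (both Source A and Source B build the identical nested dict the same way):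
-- the nested dict-of-dicts tree, as a flat inductive (entry list in insertion order).
inductive Entries where
  | nil : Entries
  | cons : String → Entries → Entries → Entries   -- cons name childEntries restOfSiblings
deriving DecidableEq, Repr

-- size measure for termination (the derived sizeOf instance is not compilable)
def Entries.size : Entries → Nat
  | .nil => 1
  | .cons _ child rest => 1 + child.size + rest.size

-- dict items in insertion order
def Entries.toItems : Entries → List (String × Entries)
  | .nil => []
  | .cons name child rest => (name, child) :: Entries.toItems rest

-- "current = current[part]" on a defaultdict chain: walk/create each part in turn
-- (a missing key is appended at the end, as defaultdict insertion order does).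
def insertParts : Entries → List String → Entries
  | e, [] => e
  | .nil, p :: ps => .cons p (insertParts .nil ps) .nil
  | .cons q c r, p :: ps =>
      if q = p then .cons q (insertParts c ps) r
      else .cons q c (insertParts r (p :: ps))
termination_by e l => (l.length, sizeOf e)

-- path.lstrip("./"): drop leading '.' and '/' characters (exact hand port of the
-- char-class lstrip); then split("/") via PySem (sep "/" ≠ "", so split? is always some).
def pathParts (path : String) : List String :=
  (PySem.Str.split? (String.ofList (path.toList.dropWhile (fun c => c = '.' ∨ c = '/'))) "/").getD []

def buildTree (paths : List String) : Entries :=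
  paths.foldl (fun t path => insertParts t (pathParts path)) Entries.nil

-- sorted(node.items()): keys of a dict are distinct, so Python's tuple sort is a key sort
def sortedItems (e : Entries) : List (String × Entries) :=
  PySem.List.sorted e.toItems (fun p => p.1) false

theorem sizeOf_lt_of_mem_toItems (e : Entries) (p : String × Entries)
    (h : p ∈ e.toItems) : Entries.size p.2 < Entries.size e := by
  induction e with
  | nil => simp [Entries.toItems] at h
  | cons name child rest ihc ihr =>
      simp [Entries.toItems] at h
      rcases h with h | h
      · subst h; simp [Entries.size]; omega
      · have := ihr h; simp [Entries.size]; omega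

theorem sizeOf_lt_of_mem_sortedItems (e : Entries) (p : String × Entries)
    (h : p ∈ sortedItems e) : Entries.size p.2 < Entries.size e :=
  sizeOf_lt_of_mem_toItems e p ((PySem.List.mem_sorted _ _ _ _).mp h)

-- ===== PORT A =====
-- make_tree: recursive; the for-loop over enumerate(items) is the foldl over the
-- attached items with accumulator (pretty_str, i).
def makeTree (node : Entries) (pre : String) : String :=
  ((sortedItems node).attach.foldl
    (fun (acc : String × Nat) it =>
      -- is_last = i == len(items)-1; connector/extension are the two if-strings
      (acc.1 ++ (pre ++ (if acc.2 = (sortedItems node).length - 1 then "└── " else "├── ")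
          ++ it.val.1 ++ "\n")
        ++ makeTree it.val.2
            (pre ++ (if acc.2 = (sortedItems node).length - 1 then "    " else "│   ")),
       acc.2 + 1))
    ("", 0)).1
termination_by Entries.size node
decreasing_by
  exact sizeOf_lt_of_mem_sortedItems node it.val it.property

def prettier (paths : List String) : String :=
  "" ++ makeTree (buildTree paths) ""

-- ===== PORT B =====
-- A stack frame: (the line to emit, the child's prefix, the child node).
-- push(node, prefix): frames for i = n-1 .. 0 appended to the stack; with the stack's top
-- as the list HEAD this is the ascending-order frame list prepended to the old stack.
def framesGo (pre : String) (n : Nat) : List (String × Entries) → Nat → List (String × String × Entries)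
  | [], _ => []
  | (name, child) :: rest, i =>
      let last := i = n - 1
      (pre ++ (if last then "└── " else "├── ") ++ name ++ "\n",
       pre ++ (if last then "    " else "│   "),
       child) :: framesGo pre n rest (i + 1)

def pushFrames (node : Entries) (pre : String) (st : List (String × String × Entries)) :
    List (String × String × Entries) :=
  framesGo pre (sortedItems node).length (sortedItems node) 0 ++ st

-- measure for the while loop: total size of the nodes on the stack
def stackSize (st : List (String × String × Entries)) : Nat :=
  (st.map (fun f => Entries.size f.2.2)).sum

theorem stackSize_framesGo (pre : String) (n : Nat) (l : List (String × Entries)) (i : Nat) :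
    stackSize (framesGo pre n l i) = (l.map (fun p => Entries.size p.2)).sum := by
  induction l generalizing i with
  | nil => simp [framesGo, stackSize]
  | cons p rest ih => cases p; simp [framesGo, stackSize] at *; simp [ih]

theorem sum_sizes_toItems_lt (e : Entries) :
    ((Entries.toItems e).map (fun p => Entries.size p.2)).sum < Entries.size e := by
  induction e with
  | nil => simp [Entries.toItems, Entries.size]
  | cons name child rest ih => simp [Entries.toItems, Entries.size] at *; omega

theorem stackSize_cons (f : String × String × Entries) (st : List (String × String × Entries)) :
    stackSize (f :: st) = Entries.size f.2.2 + stackSize st := by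
  simp [stackSize]

theorem stackSize_pushFrames (node : Entries) (pre : String)
    (st : List (String × String × Entries)) :
    stackSize (pushFrames node pre st) < Entries.size node + stackSize st := by
  have hperm : ((sortedItems node).map (fun p => Entries.size p.2)).Perm
      ((Entries.toItems node).map (fun p => Entries.size p.2)) :=
    (PySem.List.sorted_perm _ _ _).map _
  have h1 := hperm.sum_eq
  have h2 := sum_sizes_toItems_lt node
  have h3 := stackSize_framesGo pre (sortedItems node).length (sortedItems node) 0
  simp only [pushFrames, stackSize, List.map_append, List.sum_append]
  simp only [stackSize] at h3
  omega

-- while stack: pop, emit the line, push the child's frames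
def renderLoop (st : List (String × String × Entries)) (acc : String) : String :=
  match st with
  | [] => acc
  | (line, cpre, child) :: rest => renderLoop (pushFrames child cpre rest) (acc ++ line)
termination_by stackSize st
decreasing_by
  have h1 := stackSize_pushFrames child cpre rest
  rw [stackSize_cons]
  omega

def prettier_alt (paths : List String) : String :=
  renderLoop (pushFrames (buildTree paths) "" []) ""

-- ===== PRECONDITION & SPEC =====
def Spec_prettier (paths : List String) (out : String) : Prop := out = prettier_alt paths
instance (paths : List String) (out : String) : Decidable (Spec_prettier paths out) := by unfold Spec_prettier; infer_instance

-- ===== CLAIM (what is proved, stated in full; the proofs are below) =====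
def Claim_equal_prettier : Prop := ∀ (paths : List String), Dom_prettier paths → Spec_prettier paths (prettier paths)

-- ===== LEMMAS AND PROOFS =====

-- what a frame list renders to, frame by frame (makeTree = A's renderer of the child)
def framesOut : List (String × String × Entries) → String
  | [] => ""
  | (line, cpre, child) :: rest => line ++ makeTree child cpre ++ framesOut rest

theorem framesOut_append (a b : List (String × String × Entries)) :
    framesOut (a ++ b) = framesOut a ++ framesOut b := by
  induction a with
  | nil => simp [framesOut]
  | cons f rest ih =>
      obtain ⟨line, cpre, child⟩ := f
      simp [framesOut, ih, String.append_assoc]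

-- characterize A's foldl as a direct recursion over the item list with running index
def makeGo (pre : String) (n : Nat) : List (String × Entries) → Nat → String
  | [], _ => ""
  | (name, child) :: rest, i =>
      let isLast := i = n - 1
      (pre ++ (if isLast then "└── " else "├── ") ++ name ++ "\n")
        ++ makeTree child (pre ++ (if isLast then "    " else "│   "))
        ++ makeGo pre n rest (i + 1)

theorem foldl_makeTree_eq (node : Entries) (pre : String)
    (l : List {x // x ∈ sortedItems node}) (s : String) (i : Nat) :
    (l.foldl
      (fun (acc : String × Nat) it =>
        (acc.1 ++ (pre ++ (if acc.2 = (sortedItems node).length - 1 then "└── " else "├── ")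
            ++ it.val.1 ++ "\n")
          ++ makeTree it.val.2
              (pre ++ (if acc.2 = (sortedItems node).length - 1 then "    " else "│   ")),
         acc.2 + 1))
      (s, i)) =
    (s ++ makeGo pre (sortedItems node).length (l.map Subtype.val) i, i + l.length) := by
  induction l generalizing s i with
  | nil => simp [makeGo]
  | cons it rest ih =>
      obtain ⟨⟨name, child⟩, hmem⟩ := it
      simp only [List.foldl_cons]
      rw [ih]
      simp [makeGo, String.append_assoc, Prod.ext_iff]
      omega

theorem makeTree_eq_makeGo (node : Entries) (pre : String) :
    makeTree node pre = makeGo pre (sortedItems node).length (sortedItems node) 0 := by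
  rw [makeTree]
  rw [foldl_makeTree_eq node pre (sortedItems node).attach "" 0]
  simp [List.attach_map_subtype_val]

theorem framesOut_framesGo (pre : String) (n : Nat) (l : List (String × Entries)) (i : Nat) :
    framesOut (framesGo pre n l i) = makeGo pre n l i := by
  induction l generalizing i with
  | nil => simp [framesGo, framesOut, makeGo]
  | cons p rest ih =>
      obtain ⟨name, child⟩ := p
      simp [framesGo, framesOut, makeGo, ih, String.append_assoc]

theorem framesOut_pushFrames (node : Entries) (pre : String)
    (st : List (String × String × Entries)) :
    framesOut (pushFrames node pre st) = makeTree node pre ++ framesOut st := by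
  rw [pushFrames, framesOut_append, framesOut_framesGo, makeTree_eq_makeGo]

theorem renderLoop_eq_aux (n : Nat) :
    ∀ (st : List (String × String × Entries)), stackSize st ≤ n →
      ∀ acc, renderLoop st acc = acc ++ framesOut st := by
  induction n with
  | zero =>
      intro st hst acc
      match st with
      | [] => simp [renderLoop, framesOut]
      | (line, cpre, child) :: rest =>
          exfalso
          have h1 := stackSize_pushFrames child cpre rest
          simp only [stackSize_cons] at hst
          have h2 : 0 < Entries.size child := by
            cases child <;> simp [Entries.size]
          omega
  | succ n ih =>
      intro st hst acc
      match st with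
      | [] => simp [renderLoop, framesOut]
      | (line, cpre, child) :: rest =>
          rw [renderLoop]
          have h1 := stackSize_pushFrames child cpre rest
          have h2 : stackSize (pushFrames child cpre rest) ≤ n := by
            simp only [stackSize_cons] at hst
            omega
          rw [ih _ h2, framesOut_pushFrames]
          simp [framesOut, String.append_assoc]

theorem renderLoop_eq (st : List (String × String × Entries)) (acc : String) :
    renderLoop st acc = acc ++ framesOut st :=
  renderLoop_eq_aux (stackSize st) st (Nat.le_refl _) acc

-- ===== VERDICT (by name: the statement is the Claim_ definition above) =====
theorem prettier_spec : Claim_equal_prettier := by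
  intro paths _
  unfold Spec_prettier prettier prettier_alt
  rw [renderLoop_eq, framesOut_pushFrames]
  simp [framesOut]
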